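-- pv_equiv track=rewrite | github.com/mulinfro/slot_combination | lex_generator/main/build_model.py | get_list_product
-- ===== SOURCE A (Python) =====
-- def get_list_product(lst_of_lst):
--     ans = [""]
--     for lst in lst_of_lst:
--         new_ans = []
--         for e in ans:
--             for e2 in lst:
--                 if e2 == "": new_ans.append(e)
--                 else:     new_ans.append( ("%s_%s"%(e, e2)).strip("_") )
--         ans = new_ans
--     return ans
-- ===== SOURCE B (Python) =====
-- def get_list_product(lst_of_lst):
--     def combos(lsts):
--         if not lsts:
--             yield ()
--         else:
--             for e2 in lsts[0]:
--                 for tail in combos(lsts[1:]):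
--                     yield (e2,) + tail
--
--     res = []
--     for combo in combos(lst_of_lst):
--         s = ""
--         for e2 in combo:
--             if e2 != "":
--                 s = ("%s_%s" % (s, e2)).strip("_")
--         res.append(s)
--     return res
-- ===== Notes on version B (the rewrite author's own statement) =====
-- stated objective: alternative
-- what changed: Replaces the level-by-level expanding frontier list with a recursive generator of full combination tuples plus a per-combination left fold using the same incremental strip step.
import Mathlib
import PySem

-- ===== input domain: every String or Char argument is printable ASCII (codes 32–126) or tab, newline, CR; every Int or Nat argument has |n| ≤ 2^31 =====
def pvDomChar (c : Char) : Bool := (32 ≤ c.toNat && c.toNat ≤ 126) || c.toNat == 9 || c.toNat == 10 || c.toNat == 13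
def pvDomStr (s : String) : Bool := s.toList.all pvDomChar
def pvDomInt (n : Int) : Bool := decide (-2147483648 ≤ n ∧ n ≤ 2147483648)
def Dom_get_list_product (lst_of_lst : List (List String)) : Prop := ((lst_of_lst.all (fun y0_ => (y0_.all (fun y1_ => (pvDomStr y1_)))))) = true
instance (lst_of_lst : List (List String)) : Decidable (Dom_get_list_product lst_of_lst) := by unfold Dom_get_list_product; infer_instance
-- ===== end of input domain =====

-- B replaces A's level-by-level expanding frontier list with a recursive enumeration of full
-- combination tuples plus a per-combination left fold using the same incremental strip step.


-- ===== PORT A =====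
-- literal port of A: frontier list 'ans', rebuilt for each inner list
def get_list_product (lst_of_lst : List (List String)) : List String :=
  lst_of_lst.foldl
    (fun ans lst =>
      ans.foldl
        (fun new_ans e =>
          lst.foldl
            (fun new_ans e2 =>
              if e2 == "" then new_ans ++ [e]
              else new_ans ++ [PySem.Str.stripChars (e ++ "_" ++ e2) "_"])
            new_ans)
        [])
    [""]

-- ===== PORT B =====
-- Source B's 'combos' recursive generator of full combination tuples
def pvCombos : List (List String) → List (List String)
  | [] => [[]]
  | l :: rest => l.flatMap (fun e2 => (pvCombos rest).map (fun tail => e2 :: tail))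

-- literal port of B: for each combination, fold the incremental strip step from ""
def get_list_product_alt (lst_of_lst : List (List String)) : List String :=
  (pvCombos lst_of_lst).map
    (fun combo =>
      combo.foldl
        (fun s e2 =>
          if e2 != "" then PySem.Str.stripChars (s ++ "_" ++ e2) "_" else s)
        "")

-- ===== PRECONDITION & SPEC =====
def Spec_get_list_product (lst_of_lst : List (List String)) (out : List String) : Prop := out = get_list_product_alt lst_of_lst
instance (lst_of_lst : List (List String)) (out : List String) : Decidable (Spec_get_list_product lst_of_lst out) := by unfold Spec_get_list_product; infer_instance

-- ===== CLAIM (what is proved, stated in full; the proofs are below) =====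
def Claim_equal_get_list_product : Prop := ∀ (lst_of_lst : List (List String)), Dom_get_list_product lst_of_lst → Spec_get_list_product lst_of_lst (get_list_product lst_of_lst)

-- ===== LEMMAS AND PROOFS =====

-- the shared per-element step, as B folds it
def pvStep (s e2 : String) : String :=
  if e2 != "" then PySem.Str.stripChars (s ++ "_" ++ e2) "_" else s

-- A's inner two loops over one level are exactly a flatMap of the step over the frontier
lemma inner_eq (ans lst : List String) (init : List String) :
    ans.foldl
      (fun new_ans e =>
        lst.foldl
          (fun new_ans e2 =>
            if e2 == "" then new_ans ++ [e]
            else new_ans ++ [PySem.Str.stripChars (e ++ "_" ++ e2) "_"])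
          new_ans)
      init
    = init ++ ans.flatMap (fun e => lst.map (pvStep e)) := by
  induction ans generalizing init with
  | nil => simp
  | cons e rest ih =>
    have h : lst.foldl
        (fun new_ans e2 =>
          if e2 == "" then new_ans ++ [e]
          else new_ans ++ [PySem.Str.stripChars (e ++ "_" ++ e2) "_"])
        init = init ++ lst.map (pvStep e) := by
      have hfun : (fun (na : List String) e2 =>
          if e2 == "" then na ++ [e]
          else na ++ [PySem.Str.stripChars (e ++ "_" ++ e2) "_"]) =
          fun na e2 => na ++ [pvStep e e2] := by
        funext na e2
        by_cases he : e2 = "" <;> simp [pvStep, he]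
      rw [hfun, PySem.List.foldl_append_singleton_eq_map]
    simp only [List.foldl_cons, h, ih, List.flatMap_cons, List.append_assoc]

-- the frontier after processing 'lsts' from frontier 'acc' is the fold over every combination
lemma frontier_eq (lsts : List (List String)) (acc : List String) :
    lsts.foldl
      (fun ans lst =>
        ans.foldl
          (fun new_ans e =>
            lst.foldl
              (fun new_ans e2 =>
                if e2 == "" then new_ans ++ [e]
                else new_ans ++ [PySem.Str.stripChars (e ++ "_" ++ e2) "_"])
              new_ans)
          [])
      acc
    = acc.flatMap (fun s => (pvCombos lsts).map (fun c => c.foldl pvStep s)) := by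
  induction lsts generalizing acc with
  | nil => simp [pvCombos]
  | cons l ls ih =>
    rw [List.foldl_cons, inner_eq, List.nil_append, ih]
    simp [pvCombos, List.flatMap_assoc, List.flatMap_map, List.map_flatMap,
      List.map_map, Function.comp_def]

-- ===== VERDICT (by name: the statement is the Claim_ definition above) =====
theorem get_list_product_spec : Claim_equal_get_list_product := by
  intro lst_of_lst _
  unfold Spec_get_list_product get_list_product get_list_product_alt
  rw [frontier_eq]
  simp only [List.flatMap_cons, List.flatMap_nil, List.append_nil]
  rfl
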